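-- pv_equiv track=rewrite | github.com/cannero/neomacs | scripts/extract_gnu_defun_docs.py | rust_string_literal
-- ===== SOURCE A (Python) =====
-- def rust_string_literal(s: str) -> str:
--     """Format a Rust string literal that handles `\\`, `"`, and newlines.
--     Uses raw string syntax `r#"..."#` when possible to preserve grave
--     quotes verbatim, falling back to escaped form if the raw delimiter
--     appears in the body."""
--     # Try plain raw string first
--     if '"#' not in s and not any(ord(c) < 32 and c != "\n" and c != "\t" for c in s):
--         # Use r#"..."# raw string. Need to find a hash count not in the body.
--         for hashes in ["#", "##", "###"]:
--             if f'"{hashes}' not in s: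
--                 return f'r{hashes}"{s}"{hashes}'
--     # Fall back to escaped form
--     escaped = (
--         s.replace("\\", "\\\\")
--         .replace('"', '\\"')
--         .replace("\n", "\\n")
--         .replace("\t", "\\t")
--     )
--     return f'"{escaped}"'
-- ===== SOURCE B (Python) =====
-- _ESC = {'\\': '\\\\', '"': '\\"', '\n': '\\n', '\t': '\\t'}
--
-- def rust_string_literal(s: str) -> str:
--     if '"#' not in s and not any(ord(c) < 32 and c != "\n" and c != "\t" for c in s):
--         return f'r#"{s}"#'
--     return '"' + ''.join(_ESC.get(c, c) for c in s) + '"'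
-- ===== Notes on version B (the rewrite author's own statement) =====
-- stated objective: simpler
-- what changed: B replaces the four sequential .replace() scans with a single per-character translation-table pass, and collapses the raw-delimiter search loop to a direct single-hash raw return since the guard already guarantees that delimiter is absent.
import Mathlib
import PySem

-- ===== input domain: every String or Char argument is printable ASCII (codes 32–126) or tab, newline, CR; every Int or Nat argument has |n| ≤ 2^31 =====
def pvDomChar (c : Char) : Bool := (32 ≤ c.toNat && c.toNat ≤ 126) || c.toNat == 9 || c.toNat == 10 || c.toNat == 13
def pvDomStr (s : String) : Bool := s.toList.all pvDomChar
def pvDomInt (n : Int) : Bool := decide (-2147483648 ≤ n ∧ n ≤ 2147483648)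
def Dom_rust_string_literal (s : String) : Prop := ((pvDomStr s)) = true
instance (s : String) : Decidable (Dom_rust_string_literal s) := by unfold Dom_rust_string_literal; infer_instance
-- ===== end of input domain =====

-- B replaces A's four chained .replace scans by one per-character translation-table pass and
-- collapses the raw-delimiter search loop to a direct r#"…"# return (objective: simpler).

-- ===== PORT A =====
def rust_string_literal (s : String) : String :=
  if !PySem.Str.isIn "\"#" s
     && !(s.toList.any (fun c => decide (c.toNat < 32) && c != '\n' && c != '\t')) then
    -- for hashes in ["#", "##", "###"]: first hash count not preceded-by-quote in the body wins
    if !PySem.Str.isIn "\"#" s then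
      String.ofList ("r#\"".toList ++ s.toList ++ "\"#".toList)
    else if !PySem.Str.isIn "\"##" s then
      String.ofList ("r##\"".toList ++ s.toList ++ "\"##".toList)
    else if !PySem.Str.isIn "\"###" s then
      String.ofList ("r###\"".toList ++ s.toList ++ "\"###".toList)
    else
      String.ofList ("\"".toList ++ (PySem.Str.replace (PySem.Str.replace (PySem.Str.replace
        (PySem.Str.replace s "\\" "\\\\") "\"" "\\\"") "\n" "\\n") "\t" "\\t").toList ++ "\"".toList)
  else
    String.ofList ("\"".toList ++ (PySem.Str.replace (PySem.Str.replace (PySem.Str.replace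
      (PySem.Str.replace s "\\" "\\\\") "\"" "\\\"") "\n" "\\n") "\t" "\\t").toList ++ "\"".toList)

-- ===== PORT B =====
def pvEscTable : PySem.Dict Char String :=
  PySem.Dict.mk [('\\', "\\\\"), ('"', "\\\""), ('\n', "\\n"), ('\t', "\\t")]

def rust_string_literal_alt (s : String) : String :=
  if !PySem.Str.isIn "\"#" s
     && !(s.toList.any (fun c => decide (c.toNat < 32) && c != '\n' && c != '\t')) then
    String.ofList ("r#\"".toList ++ s.toList ++ "\"#".toList)
  else
    String.ofList ("\"".toList
      ++ (PySem.Str.join "" (s.toList.map (fun c => pvEscTable.getD c (String.ofList [c])))).toList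
      ++ "\"".toList)

-- ===== PRECONDITION & SPEC =====
def Spec_rust_string_literal (s : String) (out : String) : Prop := out = rust_string_literal_alt s
instance (s : String) (out : String) : Decidable (Spec_rust_string_literal s out) := by unfold Spec_rust_string_literal; infer_instance

-- ===== CLAIM (what is proved, stated in full; the proofs are below) =====
def Claim_equal_rust_string_literal : Prop := ∀ (s : String), Dom_rust_string_literal s → Spec_rust_string_literal s (rust_string_literal s)

-- ===== LEMMAS AND PROOFS =====

-- the per-character escape map B implements via its table
def pvEsc (c : Char) : List Char :=
  if c = '\\' then ['\\', '\\']
  else if c = '"' then ['\\', '"']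
  else if c = '\n' then ['\\', 'n']
  else if c = '\t' then ['\\', 't']
  else [c]

-- single-character replace is a flatMap
theorem replace_go_single (o : Char) (n : List Char) :
    ∀ (fuel : Nat) (cs acc : List Char), cs.length ≤ fuel →
      PySem.Chars.replace.go [o] n fuel cs acc
        = acc.reverse ++ cs.flatMap (fun c => if c = o then n else [c]) := by
  intro fuel
  induction fuel with
  | zero =>
    intro cs acc h
    have : cs = [] := List.length_eq_zero_iff.mp (Nat.le_zero.mp h)
    subst this; simp [PySem.Chars.replace.go]
  | succ k ih =>
    intro cs acc h
    cases cs with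
    | nil => simp [PySem.Chars.replace.go]
    | cons c t =>
      by_cases hc : c = o
      · subst hc
        have hpre : List.isPrefixOf [c] (c :: t) = true := by
          simp [List.isPrefixOf]
        rw [PySem.Chars.replace.go]
        simp only [hpre, if_true, List.length_cons, List.length_nil, List.drop_succ_cons,
          List.drop_zero]
        rw [ih t (n.reverse ++ acc) (by simpa using Nat.le_of_succ_le_succ h)]
        simp
      · have hpre : List.isPrefixOf [o] (c :: t) = false := by
          simp [List.isPrefixOf, BEq.beq]
          exact fun h' => absurd h'.symm hc
        rw [PySem.Chars.replace.go]
        simp only [hpre, Bool.false_eq_true, if_false]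
        rw [ih t (c :: acc) (by simpa using Nat.le_of_succ_le_succ h)]
        simp [hc]

theorem replace_single (o : Char) (n cs : List Char) :
    PySem.Chars.replace cs [o] n = cs.flatMap (fun c => if c = o then n else [c]) := by
  rw [PySem.Chars.replace]
  simp only [List.isEmpty_cons, Bool.false_eq_true, if_false]
  exact replace_go_single o n cs.length cs [] (le_refl _)

theorem flatMap_comp {α : Type} (f g : α → List α) (xs : List α) :
    (xs.flatMap f).flatMap g = xs.flatMap (fun a => (f a).flatMap g) := by
  induction xs with
  | nil => simp
  | cons x t ih => simp [ih]

theorem flatten_intersperse_nil {α : Type} (l : List (List α)) :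
    (List.intersperse ([] : List α) l).flatten = l.flatten := by
  induction l with
  | nil => simp
  | cons x t ih =>
    cases t with
    | nil => simp
    | cons y u => simpa [List.intersperse] using ih

-- the chained replaces of A act per original character, as pvEsc
theorem chain_eq_flatMap (cs : List Char) :
    PySem.Chars.replace (PySem.Chars.replace (PySem.Chars.replace
      (PySem.Chars.replace cs ['\\'] ['\\', '\\']) ['"'] ['\\', '"']) ['\n'] ['\\', 'n'])
      ['\t'] ['\\', 't'] = cs.flatMap pvEsc := by
  simp only [replace_single, flatMap_comp]
  apply List.flatMap_congr
  intro c _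
  by_cases h1 : c = '\\' <;> by_cases h2 : c = '"' <;> by_cases h3 : c = '\n' <;>
    by_cases h4 : c = '\t' <;> simp_all [pvEsc]

-- B's table lookup agrees with pvEsc character by character
theorem table_eq_pvEsc (c : Char) :
    (pvEscTable.getD c (String.ofList [c])).toList = pvEsc c := by
  by_cases h1 : c = '\\' <;> by_cases h2 : c = '"' <;> by_cases h3 : c = '\n' <;>
    by_cases h4 : c = '\t' <;>
    simp_all [pvEscTable, pvEsc, PySem.Dict.getD, PySem.Dict.get?, List.find?] <;>
    simp_all [show ('\\' == c) = false from beq_eq_false_iff_ne.mpr (Ne.symm h1),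
      show ('"' == c) = false from beq_eq_false_iff_ne.mpr (Ne.symm h2),
      show ('\n' == c) = false from beq_eq_false_iff_ne.mpr (Ne.symm h3),
      show ('\t' == c) = false from beq_eq_false_iff_ne.mpr (Ne.symm h4)]

-- the escaped bodies of the two ports coincide
theorem escaped_eq (s : String) :
    (PySem.Str.replace (PySem.Str.replace (PySem.Str.replace
      (PySem.Str.replace s "\\" "\\\\") "\"" "\\\"") "\n" "\\n") "\t" "\\t").toList
    = (PySem.Str.join "" (s.toList.map (fun c => pvEscTable.getD c (String.ofList [c])))).toList := by
  rw [PySem.Str.toList_join]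
  simp only [PySem.Str.toList_replace]
  have : ("\\" : String).toList = ['\\'] := rfl
  rw [PySem.Chars.join]
  simp only [List.map_map]
  have hmap : (s.toList.map (String.toList ∘ fun c => pvEscTable.getD c (String.ofList [c])))
      = s.toList.map pvEsc := by
    apply List.map_congr_left
    intro c _
    exact table_eq_pvEsc c
  rw [hmap]
  have h0 : ("" : String).toList = ([] : List Char) := rfl
  rw [h0]
  have hjoin : List.intercalate ([] : List Char) (s.toList.map pvEsc)
      = s.toList.flatMap pvEsc := by
    simp [List.intercalate, List.flatMap, flatten_intersperse_nil]
  rw [hjoin]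
  exact chain_eq_flatMap s.toList

-- ===== VERDICT (by name: the statement is the Claim_ definition above) =====
theorem rust_string_literal_spec : Claim_equal_rust_string_literal := by
  intro s _
  unfold Spec_rust_string_literal rust_string_literal rust_string_literal_alt
  by_cases hin : PySem.Str.isIn "\"#" s = true
  · simp only [hin, Bool.not_true, Bool.false_and, Bool.false_eq_true, if_false]
    rw [escaped_eq]
  · have hin' : PySem.Str.isIn "\"#" s = false := by simpa using hin
    simp only [hin', Bool.not_false, Bool.true_and]
    split_ifs with h
    · rfl
    · rw [escaped_eq]
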